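-- pv_equiv track=rewrite | github.com/prowler-cloud/prowler | prowler/lib/scan/scan.py | get_service_checks_to_execute
-- ===== SOURCE A (Python) =====
-- def get_service_name_from_check_name(check_name: str) -> str:
--     """
--     get_service_name_from_check_name returns the service name for a given check name.
--
--     Example:
--         get_service_name_from_check_name("ec2_instance_public") -> "ec2"
--     """
--     return check_name.split("_")[0]
--
-- def get_service_checks_to_execute(checks_to_execute: set[str]) -> dict[str, set[str]]:
--     """
--     get_service_checks_to_execute returns a dictionary with the services and the checks to execute.
--
--     Example:
--         get_service_checks_to_execute({"accessanalyzer_enabled", "ec2_instance_public_ip"})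
--         -> {"accessanalyzer": {"accessanalyzer_enabled"}, "ec2": {"ec2_instance_public_ip"}}
--     """
--     service_checks_to_execute = dict()
--     for check in checks_to_execute:
--         # check -> accessanalyzer_enabled
--         # service -> accessanalyzer
--         service = get_service_name_from_check_name(check)
--         if service not in service_checks_to_execute:
--             service_checks_to_execute[service] = set()
--         service_checks_to_execute[service].add(check)
--     return service_checks_to_execute
-- ===== SOURCE B (Python) =====
-- def get_service_checks_to_execute(checks_to_execute: "set[str]") -> "dict[str, set[str]]":
--     pairs = [(c.split("_")[0], c) for c in checks_to_execute]
--     services = list(dict.fromkeys(s for s, _ in pairs))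
--     return {s: {c for p, c in pairs if p == s} for s in services}
-- ===== Notes on version B (the rewrite author's own statement) =====
-- stated objective: alternative
-- what changed: Replaces the incremental dict-of-sets accumulation with a two-phase pass: first dedup the service prefixes in first-occurrence order, then build each service's check set by a filter over the input, via a dict comprehension.
import Mathlib
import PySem

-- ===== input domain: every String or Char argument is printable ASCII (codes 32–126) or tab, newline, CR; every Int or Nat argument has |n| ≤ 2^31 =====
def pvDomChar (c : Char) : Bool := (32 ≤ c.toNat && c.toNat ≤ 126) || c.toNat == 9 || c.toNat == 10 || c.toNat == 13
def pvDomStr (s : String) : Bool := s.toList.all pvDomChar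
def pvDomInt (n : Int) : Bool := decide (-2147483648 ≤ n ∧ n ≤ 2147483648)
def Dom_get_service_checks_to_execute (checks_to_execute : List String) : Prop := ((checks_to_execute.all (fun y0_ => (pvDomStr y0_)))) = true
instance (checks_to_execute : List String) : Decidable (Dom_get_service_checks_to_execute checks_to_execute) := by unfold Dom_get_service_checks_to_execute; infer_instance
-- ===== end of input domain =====

-- B replaces A's incremental dict-of-sets accumulation by a dedup-the-prefixes pass followed
-- by one filter per service (objective: alternative decomposition, same results).

-- ===== PORT A =====
-- check_name.split("_")[0]; split with a non-empty separator always returns at least one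
-- piece, so the [0] index never raises — pyGetD 0 "" is exact here.
-- split? returns none only for sep = ""; with sep = "_" it is always some, so .getD [] is exact.
def get_service_name_from_check_name (check_name : String) : String :=
  PySem.List.pyGetD ((PySem.Str.split? check_name "_").getD []) 0 ""

def get_service_checks_to_execute (checks_to_execute : List String) : List (String × List String) :=
  let service_checks_to_execute : PySem.Dict String (PySem.Set String) :=
    checks_to_execute.foldl (fun d check =>
      let service := get_service_name_from_check_name check
      let d := if d.contains service then d else d.insert service PySem.Set.empty
      d.modify service PySem.Set.empty (fun s => PySem.Set.add s check)) PySem.Dict.empty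
  service_checks_to_execute.items

-- ===== PORT B =====
def get_service_checks_to_execute_alt (checks_to_execute : List String) : List (String × List String) :=
  let pairs := checks_to_execute.map (fun c => (get_service_name_from_check_name c, c))
  let services := PySem.List.dedup (pairs.map (fun p => p.1))
  services.map (fun s =>
    (s, PySem.Set.ofList ((pairs.filter (fun p => p.1 == s)).map (fun p => p.2))))

-- ===== PRECONDITION & SPEC =====
def Spec_get_service_checks_to_execute (checks_to_execute : List String) (out : List (String × List String)) : Prop := out = get_service_checks_to_execute_alt checks_to_execute
instance (checks_to_execute : List String) (out : List (String × List String)) : Decidable (Spec_get_service_checks_to_execute checks_to_execute out) := by unfold Spec_get_service_checks_to_execute; infer_instance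

-- ===== CLAIM (what is proved, stated in full; the proofs are below) =====
def Claim_equal_get_service_checks_to_execute : Prop := ∀ (checks_to_execute : List String), Dom_get_service_checks_to_execute checks_to_execute → Spec_get_service_checks_to_execute checks_to_execute (get_service_checks_to_execute checks_to_execute)

-- ===== LEMMAS AND PROOFS =====

-- A's loop body, named for the proofs.
def pvStep (d : PySem.Dict String (PySem.Set String)) (check : String) : PySem.Dict String (PySem.Set String) :=
  let service := get_service_name_from_check_name check
  let d := if d.contains service then d else d.insert service PySem.Set.empty
  d.modify service PySem.Set.empty (fun s => PySem.Set.add s check)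

lemma pvStep_getD (d : PySem.Dict String (PySem.Set String)) (c s : String) :
    (pvStep d c).getD s PySem.Set.empty =
      if get_service_name_from_check_name c = s
      then PySem.Set.add (d.getD s PySem.Set.empty) c
      else d.getD s PySem.Set.empty := by
  unfold pvStep
  by_cases he : get_service_name_from_check_name c = s
  · subst he
    by_cases hc : d.contains (get_service_name_from_check_name c) = true
    · simp [hc, PySem.Dict.getD_modify_self]
    · have hc' : d.contains (get_service_name_from_check_name c) = false := by simpa using hc
      simp [hc', PySem.Dict.getD_modify_self, PySem.Dict.getD_insert_self,
        PySem.Dict.getD_of_not_contains d _ hc']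
  · have hne : s ≠ get_service_name_from_check_name c := fun h => he h.symm
    by_cases hc : d.contains (get_service_name_from_check_name c) = true
    · simp [he, hc, PySem.Dict.getD_modify_of_ne _ _ _ hne]
    · have hc' : d.contains (get_service_name_from_check_name c) = false := by simpa using hc
      simp [he, hc', PySem.Dict.getD_modify_of_ne _ _ _ hne,
        PySem.Dict.getD_insert_of_ne _ _ _ hne]

lemma pvStep_keys (d : PySem.Dict String (PySem.Set String)) (c : String) :
    (pvStep d c).keys = PySem.Set.add d.keys (get_service_name_from_check_name c) := by
  unfold pvStep
  by_cases hc : d.contains (get_service_name_from_check_name c) = true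
  · have hm : get_service_name_from_check_name c ∈ d.keys :=
      (PySem.Dict.contains_iff_mem_keys d _).1 hc
    simp only [hc, if_true, PySem.Dict.keys_modify,
      PySem.Dict.keys_insert_of_contains d _ hc]
    simp [PySem.Set.add, PySem.Set.contains, hm]
  · have hc' : d.contains (get_service_name_from_check_name c) = false := by simpa using hc
    have hm : get_service_name_from_check_name c ∉ d.keys := fun h => by
      simp [(PySem.Dict.contains_iff_mem_keys d _).2 h] at hc'
    simp only [hc', Bool.false_eq_true, if_false, PySem.Dict.keys_modify,
      PySem.Dict.keys_insert_of_contains _ _ (PySem.Dict.contains_insert_self d _ _),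
      PySem.Dict.keys_insert_of_not_contains d _ hc']
    simp [PySem.Set.add, PySem.Set.contains, hm]

lemma pvFold_getD (checks : List String) (d : PySem.Dict String (PySem.Set String)) (s : String) :
    (checks.foldl pvStep d).getD s PySem.Set.empty =
      PySem.Set.update (d.getD s PySem.Set.empty)
        (checks.filter (fun c => get_service_name_from_check_name c == s)) := by
  induction checks generalizing d with
  | nil => rfl
  | cons c cs ih =>
      simp only [List.foldl_cons, List.filter_cons]
      by_cases he : get_service_name_from_check_name c = s
      · rw [ih, pvStep_getD]; simp [he, PySem.Set.update]
      · rw [ih, pvStep_getD]; simp [he, PySem.Set.update]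

lemma pvFold_keys (checks : List String) (d : PySem.Dict String (PySem.Set String)) :
    (checks.foldl pvStep d).keys =
      PySem.Set.update d.keys (checks.map get_service_name_from_check_name) := by
  induction checks generalizing d with
  | nil => rfl
  | cons c cs ih => simp [List.foldl_cons, ih, pvStep_keys, PySem.Set.update]

lemma pvPairs_fst (checks : List String) :
    (checks.map (fun c => (get_service_name_from_check_name c, c))).map (fun p => p.1) =
      checks.map get_service_name_from_check_name := by
  simp

lemma pvPairs_filter (checks : List String) (s : String) :
    ((checks.map (fun c => (get_service_name_from_check_name c, c))).filter
        (fun p => p.1 == s)).map (fun p => p.2) =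
      checks.filter (fun c => get_service_name_from_check_name c == s) := by
  induction checks with
  | nil => rfl
  | cons c cs ih =>
      simp only [List.map_cons, List.filter_cons]
      by_cases h : get_service_name_from_check_name c = s
      · simp [h, ih]
      · simp [h, ih]

-- ===== VERDICT (by name: the statement is the Claim_ definition above) =====
theorem get_service_checks_to_execute_spec : Claim_equal_get_service_checks_to_execute := by
  intro checks _
  unfold Spec_get_service_checks_to_execute get_service_checks_to_execute get_service_checks_to_execute_alt
  have hfold : ∀ d check, (fun d check =>
      let service := get_service_name_from_check_name check
      let d := if d.contains service then d else d.insert service PySem.Set.empty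
      d.modify service PySem.Set.empty (fun s => PySem.Set.add s check)) d check = pvStep d check :=
    fun _ _ => rfl
  have hkeys : (checks.foldl pvStep PySem.Dict.empty).keys =
      PySem.List.dedup (checks.map get_service_name_from_check_name) := by
    rw [pvFold_keys]
    simp [PySem.List.dedup_eq_ofList, PySem.Set.update, PySem.Set.ofList, PySem.Dict.keys_empty]
  have hnd : (checks.foldl pvStep PySem.Dict.empty).keys.Nodup := by
    rw [hkeys]; exact PySem.List.nodup_dedup _
  simp only [hfold, pvPairs_fst, pvPairs_filter]
  rw [PySem.Dict.items_eq_map_keys _ hnd PySem.Set.empty, hkeys]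
  refine List.map_congr_left (fun s _ => ?_)
  rw [pvFold_getD]
  simp [PySem.Dict.getD_empty, PySem.Set.update, PySem.Set.ofList]
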